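-- pv_equiv track=rewrite | github.com/jhanley634/testing-tools | problem/binary_search_feb2018/binary_prefix_search.py | _find_match_linear
-- ===== SOURCE A (Python) =====
-- def _verify_monotonic(haystack):
--     """Haystack items shall be non-descending. Dups are OK."""
--     prev = haystack[0]
--     for item in haystack:
--         assert item >= prev, item
--         prev = item
--
-- def _find_match_linear(needle, sorted_haystack):  # Slow, but correct.
--     # If haystack contains dups, only 1st occurrence will be accessible.
--     _verify_monotonic(sorted_haystack)
--     for i, entry in enumerate(sorted_haystack):
--         if entry >= needle:
--             if (len(entry) >= len(needle)
--                     and entry[:len(needle)] == needle):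
--                 return i
--             else:
--                 return None
--     return None
-- ===== SOURCE B (Python) =====
-- from bisect import bisect_left
--
--
-- def _verify_monotonic(haystack):
--     """Haystack items shall be non-descending. Dups are OK."""
--     prev = haystack[0]
--     for item in haystack:
--         assert item >= prev, item
--         prev = item
--
--
-- def _find_match_linear(needle, sorted_haystack):
--     _verify_monotonic(sorted_haystack)
--     i = bisect_left(sorted_haystack, needle)
--     if i < len(sorted_haystack) and sorted_haystack[i].startswith(needle):
--         return i
--     return None
-- ===== Notes on version B (the rewrite author's own statement) =====
-- stated objective: alternative
-- what changed: The linear enumerate scan for the first entry >= needle is replaced by a single bisect_left binary search, and the manual length-and-slice prefix test by str.startswith; _verify_monotonic is kept unchanged.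
import Mathlib
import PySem

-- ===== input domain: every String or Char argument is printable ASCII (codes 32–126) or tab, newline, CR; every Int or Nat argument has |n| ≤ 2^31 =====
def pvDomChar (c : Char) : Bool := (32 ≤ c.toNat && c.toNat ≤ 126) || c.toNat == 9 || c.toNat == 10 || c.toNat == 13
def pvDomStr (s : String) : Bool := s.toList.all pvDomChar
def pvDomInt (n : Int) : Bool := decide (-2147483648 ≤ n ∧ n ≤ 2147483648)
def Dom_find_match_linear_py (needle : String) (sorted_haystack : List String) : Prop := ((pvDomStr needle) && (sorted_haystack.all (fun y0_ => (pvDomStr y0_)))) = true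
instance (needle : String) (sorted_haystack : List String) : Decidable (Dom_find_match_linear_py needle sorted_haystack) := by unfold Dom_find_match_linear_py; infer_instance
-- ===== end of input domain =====

-- B replaces A's linear first-match scan with bisect_left plus a single startswith test (alternative algorithm, same verification).

-- ===== PORT A =====
-- Port of _verify_monotonic, which both Pythons contain verbatim: 'true' = it returns
-- normally; 'false' = it raises (IndexError on [], AssertionError on a descent) — outside Pre_.
def verifyMonotonicOk (haystack : List String) : Bool :=
  match haystack with
  | [] => false
  | h :: _ => (haystack.foldl (fun (st : Bool × String) item => (st.1 && decide (st.2 ≤ item), item)) (true, h)).1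

-- the 'for i, entry in enumerate(...)' loop of A, carrying the running index
def findLoopA (needle : String) : List String → Nat → Option Int
  | [], _ => none
  | entry :: rest, i =>
    if needle ≤ entry then
      if PySem.Str.len needle ≤ PySem.Str.len entry &&
          (PySem.Str.slice entry none (some (PySem.Str.len needle)) == needle) then some (i : Int)
      else none
    else findLoopA needle rest (i + 1)

def find_match_linear_py (needle : String) (sorted_haystack : List String) : Option Int :=
  if verifyMonotonicOk sorted_haystack then findLoopA needle sorted_haystack 0 else none

-- ===== PORT B =====
def find_match_linear_py_alt (needle : String) (sorted_haystack : List String) : Option Int :=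
  if verifyMonotonicOk sorted_haystack then
    let i := PySem.List.bisectLeft sorted_haystack needle
    match sorted_haystack[i]? with   -- 'i < len(sorted_haystack) and sorted_haystack[i]…'
    | some entry => if PySem.Str.startswith entry needle then some (i : Int) else none
    | none => none
  else none

-- ===== PRECONDITION & SPEC =====
-- Pre_ excludes exactly the inputs where A raises: the empty haystack (IndexError in
-- _verify_monotonic) and a non-monotonic haystack (AssertionError).
def Pre_find_match_linear_py (needle : String) (sorted_haystack : List String) : Prop :=
  sorted_haystack ≠ [] ∧ List.IsChain (fun a b => a.toList ≤ b.toList) sorted_haystack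
instance (needle : String) (sorted_haystack : List String) : Decidable (Pre_find_match_linear_py needle sorted_haystack) := by unfold Pre_find_match_linear_py; infer_instance

def pvWitness_find_match_linear_py : String × List String := ("b", ["ab", "ba", "bb", "c"])

def Spec_find_match_linear_py (needle : String) (sorted_haystack : List String) (out : Option Int) : Prop := out = find_match_linear_py_alt needle sorted_haystack
instance (needle : String) (sorted_haystack : List String) (out : Option Int) : Decidable (Spec_find_match_linear_py needle sorted_haystack out) := by unfold Spec_find_match_linear_py; infer_instance

-- ===== CLAIM (what is proved, stated in full; the proofs are below) =====
def Claim_equal_find_match_linear_py : Prop := ∀ (needle : String) (sorted_haystack : List String), Dom_find_match_linear_py needle sorted_haystack → Pre_find_match_linear_py needle sorted_haystack → Spec_find_match_linear_py needle sorted_haystack (find_match_linear_py needle sorted_haystack)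

-- ===== LEMMAS AND PROOFS =====

-- A's prefix test 'len(entry) >= len(needle) and entry[:len(needle)] == needle'
-- is exactly entry.startswith(needle).
lemma acheck_eq_startswith (n e : String) :
    (PySem.Str.len n ≤ PySem.Str.len e &&
      (PySem.Str.slice e none (some (PySem.Str.len n)) == n)) = PySem.Str.startswith e n := by
  rw [Bool.eq_iff_iff]
  simp only [Bool.and_eq_true, decide_eq_true_eq, beq_iff_eq, PySem.Str.startswith_eq,
    PySem.Chars.startswith_iff]
  constructor
  · rintro ⟨-, hsl⟩
    have := PySem.Str.toList_slice e none (some (PySem.Str.len n))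
    rw [hsl] at this
    simp only [PySem.Chars.slice_eq_listSlice, PySem.Str.len_eq] at this
    rw [show ((n.toList.length : Int)) = ((n.toList.length : Nat) : Int) by simp,
      PySem.List.slice_to_natCast] at this
    rw [List.prefix_iff_eq_take]
    exact this
  · intro hp
    have hlen := hp.length_le
    have htake := (List.prefix_iff_eq_take.mp hp).symm
    refine ⟨?_, ?_⟩
    · simp only [PySem.Str.len_eq]; exact_mod_cast hlen
    · apply String.ext
      rw [PySem.Str.toList_slice]
      simp only [PySem.Chars.slice_eq_listSlice, PySem.Str.len_eq]
      rw [show ((n.toList.length : Int)) = ((n.toList.length : Nat) : Int) by simp,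
        PySem.List.slice_to_natCast]
      exact htake

-- _verify_monotonic succeeds on a nonempty non-descending list
lemma verify_ok_of_chain (xs : List String) (hne : xs ≠ [])
    (hc : List.IsChain (· ≤ ·) xs) : verifyMonotonicOk xs = true := by
  match xs, hne with
  | h :: t, _ =>
    show (List.foldl _ (true, h) (h :: t)).1 = true
    have key : ∀ (ys : List String) (p : String), List.IsChain (· ≤ ·) (p :: ys) →
        (List.foldl (fun (st : Bool × String) item => (st.1 && decide (st.2 ≤ item), item)) (true, p) ys).1 = true := by
      intro ys
      induction ys with
      | nil => intro p _; rfl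
      | cons y ys ih =>
        intro p hch
        rw [List.isChain_cons_cons] at hch
        simp only [List.foldl_cons, hch.1, decide_true, Bool.true_and]
        exact ih y hch.2
    simp only [List.foldl_cons, le_refl, decide_true, Bool.true_and]
    exact key t h hc

-- generic bisect_left loop invariant (the library lemma bisectLeftLoop_spec is Int-only;
-- this is the same statement for String)
lemma bisectLeftLoop_spec_str (xs : List String) (x : String)
    (hs : List.Pairwise (· ≤ ·) xs) :
    ∀ (fuel lo hi : Nat), lo ≤ hi → hi ≤ xs.length → hi - lo ≤ fuel →
    (∀ (j : Nat) (hj : j < xs.length), j < lo → xs[j] < x) →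
    (∀ (j : Nat) (hj : j < xs.length), hi ≤ j → x ≤ xs[j]) →
    lo ≤ PySem.List.bisectLeftLoop xs x fuel lo hi ∧
    PySem.List.bisectLeftLoop xs x fuel lo hi ≤ hi ∧
    (∀ (j : Nat) (hj : j < xs.length), j < PySem.List.bisectLeftLoop xs x fuel lo hi → xs[j] < x) ∧
    (∀ (j : Nat) (hj : j < xs.length), PySem.List.bisectLeftLoop xs x fuel lo hi ≤ j → x ≤ xs[j]) := by
  have hmono := List.pairwise_iff_getElem.mp hs
  intro fuel
  induction fuel with
  | zero =>
    intro lo hi hlh hhl hfuel hlt hge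
    have : lo = hi := by omega
    subst this
    exact ⟨le_refl _, le_refl _, fun j hj h => hlt j hj h, fun j hj h => hge j hj h⟩
  | succ fuel ih =>
    intro lo hi hlh hhl hfuel hlt hge
    show _ ≤ PySem.List.bisectLeftLoop xs x (fuel + 1) lo hi ∧ _
    rw [PySem.List.bisectLeftLoop]
    by_cases hcmp : lo < hi
    · have hmid : (lo + hi) / 2 < xs.length := by omega
      simp only [hcmp, if_true, List.getElem?_eq_getElem hmid]
      by_cases hx : xs[(lo + hi) / 2] < x
      · simp only [hx, if_true]
        have h1 : (lo + hi) / 2 + 1 ≤ hi := by omega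
        have hlt' : ∀ (j : Nat) (hj : j < xs.length), j < (lo + hi) / 2 + 1 → xs[j] < x := by
          intro j hj hjlt
          rcases Nat.lt_or_ge j ((lo + hi) / 2) with h | h
          · exact lt_of_le_of_lt (hmono j ((lo+hi)/2) hj hmid h) hx
          · have : j = (lo + hi) / 2 := by omega
            subst this; exact hx
        have := ih ((lo + hi) / 2 + 1) hi h1 hhl (by omega) hlt' hge
        exact ⟨by omega, this.2.1, this.2.2.1, this.2.2.2⟩
      · simp only [hx, if_false]
        have hge' : ∀ (j : Nat) (hj : j < xs.length), (lo + hi) / 2 ≤ j → x ≤ xs[j] := by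
          intro j hj hjge
          rcases Nat.lt_or_ge ((lo + hi) / 2) j with h | h
          · exact le_trans (le_of_not_gt hx) (hmono ((lo+hi)/2) j hmid hj h)
          · have : j = (lo + hi) / 2 := by omega
            subst this; exact le_of_not_gt hx
        have := ih lo ((lo + hi) / 2) (by omega) (by omega) (by omega) hlt hge'
        exact ⟨this.1, by omega, this.2.2.1, this.2.2.2⟩
    · simp only [hcmp, if_false]
      have : lo = hi := by omega
      subst this
      exact ⟨le_refl _, le_refl _, fun j hj h => hlt j hj h, fun j hj h => hge j hj h⟩

lemma bisectLeft_spec_str (xs : List String) (x : String)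
    (hs : List.Pairwise (· ≤ ·) xs) :
    PySem.List.bisectLeft xs x ≤ xs.length ∧
    (∀ (j : Nat) (hj : j < xs.length), j < PySem.List.bisectLeft xs x → xs[j] < x) ∧
    (∀ (j : Nat) (hj : j < xs.length), PySem.List.bisectLeft xs x ≤ j → x ≤ xs[j]) := by
  have := bisectLeftLoop_spec_str xs x hs xs.length 0 xs.length (Nat.zero_le _) (le_refl _)
    (by omega) (by intro j hj h; omega) (by intro j hj h; omega)
  exact ⟨this.2.1, this.2.2.1, this.2.2.2⟩

-- on a sorted list, bisect_left is the index of the first entry ≥ x — the index A's scan finds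
lemma bisectLeft_eq_findIdx (xs : List String) (x : String)
    (hs : List.Pairwise (· ≤ ·) xs) :
    PySem.List.bisectLeft xs x = List.findIdx (fun e => decide (x ≤ e)) xs := by
  obtain ⟨hle, hlt, hge⟩ := bisectLeft_spec_str xs x hs
  set b := PySem.List.bisectLeft xs x
  set f := List.findIdx (fun e => decide (x ≤ e)) xs with hf
  rcases Nat.lt_trichotomy b f with h | h | h
  · -- b < f : xs[b] < x but also x ≤ xs[b] (b below findIdx means test false... actually test false)
    exfalso
    have hbl : b < xs.length := lt_of_lt_of_le h (List.findIdx_le_length)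
    have := List.not_of_lt_findIdx h
    have hxb := hge b hbl (le_refl _)
    simp only [decide_eq_false_iff_not] at this
    exact absurd hxb this
  · exact h
  · exfalso
    have hfl : f < xs.length := lt_of_lt_of_le h hle
    have := List.findIdx_getElem (w := hfl)
    simp only [decide_eq_true_eq] at this
    exact absurd (hlt f hfl h) (not_lt.mpr this)

-- characterisation of A's enumerate loop via findIdx
lemma findLoopA_eq (needle : String) (xs : List String) (k : Nat) :
    findLoopA needle xs k =
      match xs[List.findIdx (fun e => decide (needle ≤ e)) xs]? with
      | some entry =>
        if PySem.Str.len needle ≤ PySem.Str.len entry &&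
            (PySem.Str.slice entry none (some (PySem.Str.len needle)) == needle) then
          some ((k + List.findIdx (fun e => decide (needle ≤ e)) xs : Nat) : Int)
        else none
      | none => none := by
  induction xs generalizing k with
  | nil => rfl
  | cons e rest ih =>
    rw [List.findIdx_cons]
    by_cases h : needle ≤ e
    · simp only [findLoopA, h, if_true, decide_true, cond_true, List.getElem?_cons_zero,
        Nat.add_zero]
    · simp only [findLoopA, h, if_false, decide_false, cond_false, List.getElem?_cons_succ]
      rw [ih (k + 1)]
      have : k + (List.findIdx (fun e => decide (needle ≤ e)) rest + 1)
           = k + 1 + List.findIdx (fun e => decide (needle ≤ e)) rest := by omega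
      rw [this]

-- ===== VERDICT (by name: the statement is the Claim_ definition above) =====
theorem find_match_linear_py_spec : Claim_equal_find_match_linear_py := by
  intro needle xs _ hpre
  obtain ⟨hne, hch'⟩ := hpre
  have hch : List.IsChain (· ≤ ·) xs :=
    hch'.imp (fun {a b} h => String.le_iff_toList_le.mpr h)
  have hpw : List.Pairwise (· ≤ ·) xs := List.IsChain.pairwise hch
  have hok := verify_ok_of_chain xs hne hch
  show find_match_linear_py needle xs = find_match_linear_py_alt needle xs
  unfold find_match_linear_py find_match_linear_py_alt
  rw [hok]
  simp only [if_true]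
  rw [findLoopA_eq, bisectLeft_eq_findIdx xs needle hpw]
  cases hg : xs[List.findIdx (fun e => decide (needle ≤ e)) xs]? with
  | none => rfl
  | some entry =>
    simp only [acheck_eq_startswith, Nat.zero_add]
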